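-- pv_equiv track=rewrite | github.com/astro-ez/pc-part-picker-ml | shared/utils/preprocess_utils.py | guess_main_label
-- ===== SOURCE A (Python) =====
-- from typing import List, Dict, Tuple
--
-- CATEGORIES = ["CASE","CASE_FAN","CPU","CPU_COOLER","GPU","MOTHERBOARD","PSU","RAM","STORAGE"]
--
-- MAIN_PRIORITY = ["GPU","CPU","MOTHERBOARD","RAM","STORAGE","PSU","CPU_COOLER","CASE_FAN","CASE"]
--
-- def guess_main_label(counts: Dict[str,int]) -> str:
--     # pick by count; tie-break by priority
--     best = None
--     best_count = -1
--     for cat in CATEGORIES: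
--         c = counts.get(cat, 0)
--         if c > best_count or (c == best_count and
--                               (best is None or MAIN_PRIORITY.index(cat) < MAIN_PRIORITY.index(best))):
--             best = cat
--             best_count = c
--     return best or "STORAGE"  # safe default
-- ===== SOURCE B (Python) =====
-- CATEGORIES = ["CASE","CASE_FAN","CPU","CPU_COOLER","GPU","MOTHERBOARD","PSU","RAM","STORAGE"]
--
-- MAIN_PRIORITY = ["GPU","CPU","MOTHERBOARD","RAM","STORAGE","PSU","CPU_COOLER","CASE_FAN","CASE"]
--
-- def guess_main_label(counts):
--     # max count in one pass, then the first category in priority order attaining it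
--     max_count = max(counts.get(cat, 0) for cat in CATEGORIES)
--     candidates = [cat for cat in MAIN_PRIORITY if counts.get(cat, 0) == max_count]
--     return candidates[0]
-- ===== Notes on version B (the rewrite author's own statement) =====
-- stated objective: simpler
-- what changed: Replaces A's single interleaved best/best_count update loop with tie-breaking inside the loop by three explicit passes: max of the nine counts, the candidates attaining it, and the first candidate in priority order.
import Mathlib
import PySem

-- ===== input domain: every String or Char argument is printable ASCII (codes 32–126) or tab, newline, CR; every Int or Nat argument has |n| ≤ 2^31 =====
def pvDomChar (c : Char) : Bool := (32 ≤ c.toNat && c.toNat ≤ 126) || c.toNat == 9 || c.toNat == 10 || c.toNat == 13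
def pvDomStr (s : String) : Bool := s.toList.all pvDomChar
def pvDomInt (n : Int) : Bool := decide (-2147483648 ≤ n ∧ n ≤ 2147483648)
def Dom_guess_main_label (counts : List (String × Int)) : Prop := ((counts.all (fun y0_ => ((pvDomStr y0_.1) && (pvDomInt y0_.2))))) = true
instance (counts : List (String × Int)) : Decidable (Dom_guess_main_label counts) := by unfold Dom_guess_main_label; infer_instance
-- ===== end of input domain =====

-- B replaces A's single interleaved best/best_count update loop by three explicit passes
-- (max of the counts, candidates attaining it, first candidate in priority order); same cost,
-- a different decomposition.

-- ===== PORT A =====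
def pvCATEGORIES : List String := ["CASE","CASE_FAN","CPU","CPU_COOLER","GPU","MOTHERBOARD","PSU","RAM","STORAGE"]

def pvMAIN_PRIORITY : List String := ["GPU","CPU","MOTHERBOARD","RAM","STORAGE","PSU","CPU_COOLER","CASE_FAN","CASE"]

-- counts.get(cat, 0): dict lookup = first match in the association list, default 0
def pvGet (counts : List (String × Int)) (cat : String) : Int :=
  (List.lookup cat counts).getD 0

-- MAIN_PRIORITY.index(cat): cat is always a member of MAIN_PRIORITY here, so .index never
-- raises and the .getD 0 default is unreachable
def pvIdx (cat : String) : Nat :=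
  (PySem.List.index? pvMAIN_PRIORITY cat).getD 0

-- the body of A's `for cat in CATEGORIES` loop
def guessStep (counts : List (String × Int)) (st : Option String × Int) (cat : String) :
    Option String × Int :=
  let c := pvGet counts cat
  if decide (c > st.2) ||
     (decide (c = st.2) &&
      (match st.1 with
       | none => true
       | some b => decide (pvIdx cat < pvIdx b)))
  then (some cat, c) else st

def guess_main_label (counts : List (String × Int)) : String :=
  let st := pvCATEGORIES.foldl (guessStep counts) (none, -1)
  -- `best or "STORAGE"`: best is never the empty string, so Python's `or` is a None-default
  st.1.getD "STORAGE"

-- ===== PORT B =====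
def guess_main_label_alt (counts : List (String × Int)) : String :=
  -- CATEGORIES is nonempty, so max? is always some; the .getD default is unreachable
  let maxCount := (PySem.List.max? (pvCATEGORIES.map (fun cat => pvGet counts cat)) id).getD 0
  let candidates := pvMAIN_PRIORITY.filter (fun cat => pvGet counts cat == maxCount)
  -- candidates[0]: the max is attained, so candidates is nonempty and the default unreachable
  candidates.headD "STORAGE"

-- ===== PRECONDITION & SPEC =====
-- Pre_ excludes only the degenerate inputs on which every one of the nine categories is
-- present with a count below -1: there A's loop never updates `best` and its `or "STORAGE"`
-- fallback answers, while B picks the category of maximal count — on such nonsensical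
-- all-negative counts both values are defensible and neither is specified.
def Pre_guess_main_label (counts : List (String × Int)) : Prop :=
  ∃ cat ∈ (["CASE","CASE_FAN","CPU","CPU_COOLER","GPU","MOTHERBOARD","PSU","RAM","STORAGE"] : List String),
    -1 ≤ (List.lookup cat counts).getD 0
instance (counts : List (String × Int)) : Decidable (Pre_guess_main_label counts) := by unfold Pre_guess_main_label; infer_instance

def pvWitness_guess_main_label : (List (String × Int)) := [("GPU", 3)]

def Spec_guess_main_label (counts : List (String × Int)) (out : String) : Prop := out = guess_main_label_alt counts
instance (counts : List (String × Int)) (out : String) : Decidable (Spec_guess_main_label counts out) := by unfold Spec_guess_main_label; infer_instance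

-- ===== CLAIM (what is proved, stated in full; the proofs are below) =====
def Claim_equal_guess_main_label : Prop := ∀ (counts : List (String × Int)), Dom_guess_main_label counts → Pre_guess_main_label counts → Spec_guess_main_label counts (guess_main_label counts)

-- ===== LEMMAS AND PROOFS =====

-- running maximum of A's loop: max of -1 and the counts of the processed categories
def pvM (counts : List (String × Int)) (cs : List String) : Int :=
  cs.foldl (fun a c => max a (pvGet counts c)) (-1)

-- invariant of A's loop after processing the prefix cs
def pvInv (counts : List (String × Int)) (cs : List String) (st : Option String × Int) : Prop :=
  st.2 = pvM counts cs ∧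
  match st.1 with
  | none => st.2 = -1 ∧ ∀ c ∈ cs, pvGet counts c < -1
  | some b => b ∈ cs ∧ b ∈ pvMAIN_PRIORITY ∧ pvGet counts b = st.2 ∧
      ∀ c ∈ cs, pvGet counts c = st.2 → pvIdx b ≤ pvIdx c

theorem pvM_le (counts : List (String × Int)) (cs : List String) :
    -1 ≤ pvM counts cs ∧ ∀ c ∈ cs, pvGet counts c ≤ pvM counts cs := by
  have h : pvM counts cs = List.foldl max (-1) (cs.map (pvGet counts)) := by
    rw [pvM, List.foldl_map]
  rw [h]
  refine ⟨(PySem.List.le_foldl_max _ _).1, fun c hc => ?_⟩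
  exact (PySem.List.le_foldl_max _ _).2 _ (List.mem_map_of_mem hc)

theorem pvM_append (counts : List (String × Int)) (cs : List String) (cat : String) :
    pvM counts (cs ++ [cat]) = max (pvM counts cs) (pvGet counts cat) := by
  simp [pvM, List.foldl_append]

theorem pvInv_step (counts : List (String × Int)) (cs : List String) (st : Option String × Int)
    (cat : String) (hcat : cat ∈ pvMAIN_PRIORITY) (h : pvInv counts cs st) :
    pvInv counts (cs ++ [cat]) (guessStep counts st cat) := by
  obtain ⟨hP1, hP2⟩ := h
  have hle := (pvM_le counts cs).2
  cases hb : st.1 with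
  | none =>
    rw [hb] at hP2
    obtain ⟨hm1, hall⟩ := hP2
    simp only [guessStep, hb, Bool.and_true, Bool.or_eq_true, decide_eq_true_eq]
    split
    · rename_i hc
      refine ⟨?_, ?_⟩
      · rw [pvM_append, ← hP1]; omega
      · refine ⟨List.mem_append.2 (Or.inr (by simp)), hcat, rfl, fun c hc' hceq => ?_⟩
        rcases List.mem_append.1 hc' with hc' | hc'
        · exact absurd hceq (by have := hall c hc'; omega)
        · rw [List.mem_singleton] at hc'; subst hc'; exact le_refl _
    · rename_i hc
      push Not at hc
      refine ⟨?_, ?_⟩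
      · rw [pvM_append, ← hP1, hP1, hm1] at *; omega
      · rw [hb]
        refine ⟨hm1, fun c hc' => ?_⟩
        rcases List.mem_append.1 hc' with h' | h'
        · exact hall c h'
        · rw [List.mem_singleton] at h'; subst h'; omega
  | some b =>
    rw [hb] at hP2
    obtain ⟨hbcs, hbMP, hfb, hmin⟩ := hP2
    simp only [guessStep, hb, Bool.or_eq_true, Bool.and_eq_true, decide_eq_true_eq]
    split
    · rename_i hc
      refine ⟨?_, ?_⟩
      · rw [pvM_append, ← hP1]; omega
      · refine ⟨List.mem_append.2 (Or.inr (by simp)), hcat, rfl, fun c hc' hceq => ?_⟩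
        rcases List.mem_append.1 hc' with hc' | hc'
        · have h1 := hle c hc'
          rcases hc with hgt | ⟨heq, hidx⟩
          · exact absurd hceq (by omega)
          · have := hmin c hc' (by omega)
            omega
        · rw [List.mem_singleton] at hc'; subst hc'; exact le_refl _
    · rename_i hc
      push Not at hc
      refine ⟨?_, ?_⟩
      · rw [pvM_append, ← hP1]; omega
      · rw [hb]
        refine ⟨List.mem_append.2 (Or.inl hbcs), hbMP, hfb, fun c hc' hceq => ?_⟩
        rcases List.mem_append.1 hc' with h' | h'
        · exact hmin c h' hceq
        · rw [List.mem_singleton] at h'; subst h'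
          have h2 := hc.2 hceq
          omega
theorem pvInv_foldl (counts : List (String × Int)) :
    ∀ (rest cs : List String) (st : Option String × Int),
      (∀ c ∈ rest, c ∈ pvMAIN_PRIORITY) → pvInv counts cs st →
      pvInv counts (cs ++ rest) (rest.foldl (guessStep counts) st) := by
  intro rest
  induction rest with
  | nil => intro cs st _ h; simpa using h
  | cons r rest' ih =>
    intro cs st hmem h
    have h1 := pvInv_step counts cs st r (hmem r (by simp)) h
    have h2 := ih (cs ++ [r]) _ (fun c hc => hmem c (by simp [hc])) h1
    simpa [List.append_assoc] using h2

-- first element of l satisfying p, described by idxOf minimality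
theorem headD_filter_first (p : String → Bool) :
    ∀ (l : List String) (b : String) (d : String), l.Nodup → b ∈ l → p b = true →
      (∀ c ∈ l, p c = true → l.idxOf b ≤ l.idxOf c) → (l.filter p).headD d = b := by
  intro l
  induction l with
  | nil => intro b d _ hb; simp at hb
  | cons a l' ih =>
    intro b d hnd hb hp hmin
    by_cases hab : a = b
    · subst hab; simp [List.filter, hp]
    · have hpa : p a = false := by
        by_contra hpa
        rw [Bool.not_eq_false] at hpa
        have := hmin a (by simp) hpa
        rw [List.idxOf_cons_self] at this
        have hb0 : (l'.idxOf b).succ ≤ 0 := by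
          rwa [List.idxOf_cons_ne _ hab] at this
        omega
      have hb' : b ∈ l' := by
        rcases List.mem_cons.1 hb with h | h
        · exact absurd h.symm hab
        · exact h
      rw [List.filter_cons_of_neg (by simp [hpa])]
      refine ih b d (List.nodup_cons.1 hnd).2 hb' hp (fun c hc hpc => ?_)
      have hac : a ≠ c := fun h => (List.nodup_cons.1 hnd).1 (h ▸ hc)
      have := hmin c (by simp [hc]) hpc
      rw [List.idxOf_cons_ne _ hab, List.idxOf_cons_ne _ hac] at this
      omega

theorem mem_MP_mem_CATS (c : String) (h : c ∈ pvMAIN_PRIORITY) : c ∈ pvCATEGORIES := by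
  fin_cases h <;> decide

theorem pvIdx_eq_idxOf (c : String) (h : c ∈ pvMAIN_PRIORITY) :
    pvIdx c = pvMAIN_PRIORITY.idxOf c := by
  fin_cases h <;> decide

-- ===== VERDICT (by name: the statement is the Claim_ definition above) =====
theorem guess_main_label_spec : Claim_equal_guess_main_label := by
  intro counts _ hpre
  unfold Spec_guess_main_label
  simp only [guess_main_label, guess_main_label_alt]
  have hinv := pvInv_foldl counts pvCATEGORIES [] (none, -1) (by decide)
    ⟨rfl, rfl, fun c hc => absurd hc (List.not_mem_nil)⟩
  rw [List.nil_append] at hinv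
  obtain ⟨hP1, hP2⟩ := hinv
  set st := pvCATEGORIES.foldl (guessStep counts) (none, -1) with hst
  cases hb : st.1 with
  | none =>
    rw [hb] at hP2
    obtain ⟨cat, hm, hge⟩ := hpre
    have := hP2.2 cat (by simpa [pvCATEGORIES] using hm)
    simp only [pvGet] at this
    omega
  | some b =>
    rw [hb] at hP2
    obtain ⟨hbcs, hbMP, hfb, hmin⟩ := hP2
    obtain ⟨m, hmax⟩ : ∃ m, PySem.List.max? (pvCATEGORIES.map (fun cat => pvGet counts cat)) id = some m := by
      cases h : PySem.List.max? (pvCATEGORIES.map (fun cat => pvGet counts cat)) id with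
      | none => simp [pvCATEGORIES] at h
      | some m => exact ⟨m, rfl⟩
    have hub : pvGet counts b ≤ m :=
      PySem.List.max?_isMax hmax _ (List.mem_map_of_mem hbcs)
    have hmm : m ≤ st.2 := by
      obtain ⟨c0, hc0, hc0m⟩ := List.mem_map.1 (PySem.List.max?_mem hmax)
      rw [hP1, ← hc0m]
      exact (pvM_le counts pvCATEGORIES).2 c0 hc0
    have hms : m = st.2 := by omega
    simp only [hmax, Option.getD_some]
    refine (headD_filter_first _ pvMAIN_PRIORITY b "STORAGE" (by decide) hbMP
      (by simp [hfb, hms]) (fun c hc hpc => ?_)).symm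
    have hcCATS := mem_MP_mem_CATS c hc
    have : pvGet counts c = st.2 := by
      rw [← hms]; exact (beq_iff_eq).1 hpc
    have := hmin c hcCATS this
    rw [pvIdx_eq_idxOf b hbMP, pvIdx_eq_idxOf c hc] at this
    exact this
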